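-- pv_equiv track=rewrite | github.com/LiudmylaKosianova/Hangman | hangman_with_hint.py | match_with_gaps
-- ===== SOURCE A (Python) =====
-- def match_with_gaps(my_word, other_word):
--     '''
--     my_word: string with _ characters, current guess of secret word
--     other_word: string, regular English word
--     returns: boolean, True if all the actual letters of my_word match the
--         corresponding letters of other_word, or the letter is the special symbol
--         _ , and my_word and other_word are of the same length;
--         False otherwise:
--     '''
--     # FILL IN YOUR CODE HERE AND DELETE "pass"
--     #pass
--     my_word_2 = ''
--     for char in my_word:
--        if char != ' ':
--           my_word_2 = my_word_2 + char
--
--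
--     if len(my_word_2) != len(other_word):
--
--        return False
--
--     for i in range (len(my_word_2)):
--        if (my_word_2[i] != '_') and (my_word_2[i] != other_word[i]):
--
--           return False
--
--     list1 = []
--     for char in my_word_2:
--        if char != '_':
--           list1.append(char)
--
--     list2 = []
--     for char in other_word:
--        if char in list1:
--           list2.append(char)
--
--     letter_count1 = {}
--     for char in list1:
--         if char in letter_count1:
--           letter_count1[char] += 1
--         else:
--           letter_count1[char] = 1
--
--     letter_count2 = {}
--     for char in list2:
--         if char in letter_count2:
--           letter_count2[char] += 1
--         else:
--           letter_count2[char] = 1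
--
--     if letter_count1 != letter_count2:
--        return False
--
--     return True
-- ===== SOURCE B (Python) =====
-- def match_with_gaps(my_word, other_word):
--     w = ''.join(c for c in my_word if c != ' ')
--     if len(w) != len(other_word):
--         return False
--     revealed = {c for c in w if c != '_'}
--     for a, b in zip(w, other_word):
--         if a == '_':
--             if b in revealed:
--                 return False
--         elif a != b:
--             return False
--     return True
-- ===== Notes on version B (the rewrite author's own statement) =====
-- stated objective: simpler
-- what changed: B replaces A's four list/dict-building loops (list1, list2 and two frequency dicts compared as mappings) by one positional pass over zip(w, other_word) with a precomputed revealed-letter set, folding A's count check into the rule 'no revealed letter may appear at a hidden position'.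
import Mathlib
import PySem

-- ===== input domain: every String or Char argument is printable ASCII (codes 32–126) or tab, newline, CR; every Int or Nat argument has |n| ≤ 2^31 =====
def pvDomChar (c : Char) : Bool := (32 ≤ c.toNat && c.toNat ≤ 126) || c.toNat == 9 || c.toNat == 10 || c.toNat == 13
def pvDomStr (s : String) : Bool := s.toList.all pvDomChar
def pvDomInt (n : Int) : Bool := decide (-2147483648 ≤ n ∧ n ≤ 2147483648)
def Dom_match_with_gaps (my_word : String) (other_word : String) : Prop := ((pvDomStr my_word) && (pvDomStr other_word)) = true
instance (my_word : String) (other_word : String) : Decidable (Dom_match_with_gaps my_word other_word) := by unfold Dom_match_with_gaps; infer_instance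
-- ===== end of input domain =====

-- B replaces A's two filtered lists and two frequency dicts by a single positional pass over
-- zip(w, other_word) with a precomputed revealed-letter set (objective: simpler).

-- ===== PORT A =====

-- A's counting loop, written twice in the Python: 'd = {}; for char in l: if char in d: d[char] += 1 else: d[char] = 1'
def pvCountLoop (l : List Char) : PySem.Dict Char Int :=
  l.foldl (fun d c => if d.contains c then d.insert c (d.getD c 0 + 1) else d.insert c 1)
    PySem.Dict.empty

-- Python's 'letter_count1 != letter_count2' compares dicts as MAPPINGS (insertion order ignored):
-- same key set and the same value at every key.  Exact here because both dicts have Nodup keys.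
def pvDictEq (d1 d2 : PySem.Dict Char Int) : Bool :=
  PySem.Set.equal (PySem.Set.ofList d1.keys) (PySem.Set.ofList d2.keys) &&
  d1.keys.all (fun k => d1.getD k 0 == d2.getD k 0)

def match_with_gaps (my_word : String) (other_word : String) : Bool :=
  -- my_word_2 = '' ; for char in my_word: if char != ' ': my_word_2 = my_word_2 + char
  let my_word_2 : List Char :=
    my_word.toList.foldl (fun acc c => if c ≠ ' ' then acc ++ [c] else acc) []
  let o : List Char := other_word.toList
  -- if len(my_word_2) != len(other_word): return False
  if my_word_2.length ≠ o.length then false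
  -- for i in range(len(my_word_2)): if w[i] != '_' and w[i] != other_word[i]: return False
  else if (PySem.List.pyRange 0 (my_word_2.length : Int) 1).any
      (fun i => decide (PySem.List.pyGetD my_word_2 i ' ' ≠ '_' ∧
                        PySem.List.pyGetD my_word_2 i ' ' ≠ PySem.List.pyGetD o i ' ')) then false
  else
    -- list1 = []; for char in my_word_2: if char != '_': list1.append(char)
    let list1 : List Char := my_word_2.foldl (fun acc c => if c ≠ '_' then acc ++ [c] else acc) []
    -- list2 = []; for char in other_word: if char in list1: list2.append(char)
    let list2 : List Char := o.foldl (fun acc c => if c ∈ list1 then acc ++ [c] else acc) []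
    let letter_count1 : PySem.Dict Char Int := pvCountLoop list1
    let letter_count2 : PySem.Dict Char Int := pvCountLoop list2
    -- if letter_count1 != letter_count2: return False ; return True
    if ¬ (pvDictEq letter_count1 letter_count2 = true) then false
    else true

-- ===== PORT B =====

def match_with_gaps_alt (my_word : String) (other_word : String) : Bool :=
  -- w = ''.join(c for c in my_word if c != ' ')
  let w : List Char := my_word.toList.filter (fun c => decide (c ≠ ' '))
  let o : List Char := other_word.toList
  if w.length ≠ o.length then false
  else
    -- revealed = {c for c in w if c != '_'}
    let revealed : PySem.Set Char := PySem.Set.ofList (w.filter (fun c => decide (c ≠ '_')))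
    -- for a, b in zip(w, other_word): … ; return True
    (w.zip o).all (fun p =>
      if p.1 = '_' then ! PySem.Set.contains revealed p.2 else p.1 == p.2)

-- ===== PRECONDITION & SPEC =====
def Spec_match_with_gaps (my_word : String) (other_word : String) (out : Bool) : Prop := out = match_with_gaps_alt my_word other_word
instance (my_word : String) (other_word : String) (out : Bool) : Decidable (Spec_match_with_gaps my_word other_word out) := by unfold Spec_match_with_gaps; infer_instance

-- ===== CLAIM (what is proved, stated in full; the proofs are below) =====
def Claim_equal_match_with_gaps : Prop := ∀ (my_word : String) (other_word : String), Dom_match_with_gaps my_word other_word → Spec_match_with_gaps my_word other_word (match_with_gaps my_word other_word)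

-- ===== LEMMAS AND PROOFS =====

-- A's index loop over range(len(w)) is the same test pair-by-pair over zip(w, o).
theorem pvAnyRangeZip (w o : List Char) (hlen : w.length = o.length) (f : Char → Char → Bool) :
    (List.range w.length).any (fun k => f (w.getD k ' ') (o.getD k ' ')) =
      (w.zip o).any (fun p => f p.1 p.2) := by
  induction w generalizing o with
  | nil => simp
  | cons a w ih =>
    cases o with
    | nil => simp at hlen
    | cons b o =>
      simp only [List.length_cons, List.range_succ_eq_map, List.any_cons, List.any_map,
        List.zip_cons_cons]
      have := ih o (by simpa using hlen)
      simp only [Function.comp_def, List.getD_cons_succ, List.getD_cons_zero] at *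
      rw [this]

theorem pvAnyPyRangeZip (w o : List Char) (hlen : w.length = o.length) (f : Char → Char → Bool) :
    (PySem.List.pyRange 0 (w.length : Int) 1).any
        (fun i => f (PySem.List.pyGetD w i ' ') (PySem.List.pyGetD o i ' ')) =
      (w.zip o).any (fun p => f p.1 p.2) := by
  rw [PySem.List.pyRange_zero_nat, List.any_map]
  have h := pvAnyRangeZip w o hlen f
  rw [← h]
  simp only [Function.comp_def, PySem.List.pyGetD_natCast]

theorem pvPosBridge (w o : List Char) (hlen : w.length = o.length) :
    (PySem.List.pyRange 0 (w.length : Int) 1).any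
        (fun i => decide (PySem.List.pyGetD w i ' ' ≠ '_' ∧
                          PySem.List.pyGetD w i ' ' ≠ PySem.List.pyGetD o i ' ')) =
      (w.zip o).any (fun p => decide (p.1 ≠ '_' ∧ p.1 ≠ p.2)) :=
  pvAnyPyRangeZip w o hlen (fun a b => decide (a ≠ '_' ∧ a ≠ b))

-- the count quirk at its core: with every non-hidden letter equal positionally, the letters of
-- other_word counted per letter are the revealed letters plus those at hidden positions
theorem pvCountZip (c : Char) (hc : c ≠ '_') (z : List (Char × Char))
    (hpos : ∀ p ∈ z, p.1 = '_' ∨ p.1 = p.2) :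
    (z.map Prod.snd).count c =
      (z.map Prod.fst).count c + z.countP (fun p => decide (p.1 = '_' ∧ p.2 = c)) := by
  induction z with
  | nil => simp
  | cons p z ih =>
    obtain ⟨a, b⟩ := p
    have hrec := ih (fun q hq => hpos q (List.mem_cons_of_mem _ hq))
    have hpred : z.countP (fun p => decide (p.1 = '_') && decide (p.2 = c)) =
        z.countP (fun p => decide (p.1 = '_' ∧ p.2 = c)) :=
      List.countP_congr (fun x _ => by simp)
    simp only [List.map_cons, List.count_cons, List.countP_cons]
    rcases hpos (a, b) List.mem_cons_self with h | h
    · simp only at h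
      subst h
      by_cases hbc : b = c
      · subst hbc
        simp [Ne.symm hc]
        omega
      · simp [Ne.symm hc, hbc]
        omega
    · simp only at h
      subst h
      by_cases hac : a = c
      · subst hac
        simp [hc]
        omega
      · simp [hac]
        omega

-- lift pvCountZip through the two filters of A's list1/list2 construction
theorem pvCountSplit (L : List Char) (z : List (Char × Char))
    (hpos : ∀ p ∈ z, p.1 = '_' ∨ p.1 = p.2)
    (hL : '_' ∉ L) (c : Char) (hc : c ∈ L) :
    ((z.map Prod.snd).filter (fun b => decide (b ∈ L))).count c =
      ((z.map Prod.fst).filter (fun a => decide (a ≠ '_'))).count c +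
        z.countP (fun p => decide (p.1 = '_' ∧ p.2 = c)) := by
  have hc' : c ≠ '_' := fun h => hL (h ▸ hc)
  rw [List.count_filter (by simp [hc]), List.count_filter (by simp [hc'])]
  exact pvCountZip c hc' z hpos

-- equal letter counters  ↔  no revealed letter sits at a hidden position of other_word
theorem pvCountsIffHidden (z : List (Char × Char))
    (hpos : ∀ p ∈ z, p.1 = '_' ∨ p.1 = p.2) :
    (∀ c : Char,
        ((z.map Prod.fst).filter (fun a => decide (a ≠ '_'))).count c =
        ((z.map Prod.snd).filter (fun b =>
            decide (b ∈ (z.map Prod.fst).filter (fun a => decide (a ≠ '_'))))).count c) ↔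
      (∀ p ∈ z, p.1 = '_' → p.2 ∉ (z.map Prod.fst).filter (fun a => decide (a ≠ '_'))) := by
  set L := (z.map Prod.fst).filter (fun a => decide (a ≠ '_')) with hLdef
  have hL : '_' ∉ L := by
    intro h
    have := List.of_mem_filter h
    simp at this
  constructor
  · intro hcnt p hp hhid hmem
    have hsplit := pvCountSplit L z hpos hL p.2 hmem
    rw [← hLdef] at hsplit
    rw [← hcnt p.2] at hsplit
    have hzero : z.countP (fun q => decide (q.1 = '_' ∧ q.2 = p.2)) = 0 := by omega
    rw [List.countP_eq_zero] at hzero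
    exact hzero p hp (by simp [hhid])
  · intro hhid c
    by_cases hc : c ∈ L
    · have hzero : z.countP (fun q => decide (q.1 = '_' ∧ q.2 = c)) = 0 := by
        rw [List.countP_eq_zero]
        intro q hq hcond
        simp only [decide_eq_true_eq] at hcond
        exact hhid q hq hcond.1 (hcond.2 ▸ hc)
      have hsplit := pvCountSplit L z hpos hL c hc
      rw [← hLdef] at hsplit
      omega
    · have h1 : L.count c = 0 := List.count_eq_zero.mpr hc
      have h2 : ((z.map Prod.snd).filter (fun b => decide (b ∈ L))).count c = 0 := by
        rw [List.count_eq_zero]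
        intro hmem
        have := List.of_mem_filter hmem
        simp only [decide_eq_true_eq] at this
        exact hc this
      rw [h1, h2]

-- Python's counter-building loop, branch folded away
theorem pvBuildEq (l : List Char) :
    pvCountLoop l = l.foldl (fun d c => d.insert c (d.getD c 0 + 1)) PySem.Dict.empty := by
  unfold pvCountLoop
  apply PySem.List.foldl_congr_mem'
  intro c _ d
  by_cases h : d.contains c = true
  · simp [h]
  · rw [Bool.not_eq_true] at h
    simp [h, PySem.Dict.getD_of_not_contains d 0 h]

-- Python dict == on the two counters is exactly countwise equality of the two lists
theorem pvDictEqIffCounts (l1 l2 : List Char) :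
    pvDictEq (pvCountLoop l1) (pvCountLoop l2) = true ↔
      ∀ c : Char, l1.count c = l2.count c := by
  rw [pvBuildEq, pvBuildEq]
  have hgd1 : ∀ c, ((l1.foldl (fun d c => d.insert c (d.getD c 0 + 1))
      (PySem.Dict.empty : PySem.Dict Char Int)).getD c 0) = (l1.count c : Int) := by
    intro c; rw [PySem.Dict.getD_foldl_insert_add_one, PySem.Dict.getD_empty]; ring
  have hgd2 : ∀ c, ((l2.foldl (fun d c => d.insert c (d.getD c 0 + 1))
      (PySem.Dict.empty : PySem.Dict Char Int)).getD c 0) = (l2.count c : Int) := by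
    intro c; rw [PySem.Dict.getD_foldl_insert_add_one, PySem.Dict.getD_empty]; ring
  have hk1 : (l1.foldl (fun d c => d.insert c (d.getD c 0 + 1))
      (PySem.Dict.empty : PySem.Dict Char Int)).keys = PySem.Set.ofList l1 := by
    rw [PySem.Dict.keys_foldl_insert, PySem.Dict.keys_empty, PySem.Set.update_nil_left]
  have hk2 : (l2.foldl (fun d c => d.insert c (d.getD c 0 + 1))
      (PySem.Dict.empty : PySem.Dict Char Int)).keys = PySem.Set.ofList l2 := by
    rw [PySem.Dict.keys_foldl_insert, PySem.Dict.keys_empty, PySem.Set.update_nil_left]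
  unfold pvDictEq
  rw [hk1, hk2, Bool.and_eq_true, PySem.Set.equal_iff, List.all_eq_true]
  constructor
  · rintro ⟨hmem, hval⟩ c
    by_cases hc : c ∈ l1
    · have := hval c (by rw [PySem.Set.mem_ofList]; exact hc)
      rw [beq_iff_eq, hgd1, hgd2] at this
      exact_mod_cast this
    · have hc2 : c ∉ l2 := by
        intro h
        apply hc
        have h2 : c ∈ PySem.Set.ofList (PySem.Set.ofList l1) := (hmem c).mpr (by
          rw [PySem.Set.mem_ofList, PySem.Set.mem_ofList]; exact h)
        rw [PySem.Set.mem_ofList, PySem.Set.mem_ofList] at h2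
        exact h2
      rw [List.count_eq_zero.mpr hc, List.count_eq_zero.mpr hc2]
  · intro hcnt
    constructor
    · intro c
      simp only [PySem.Set.mem_ofList]
      rw [← List.count_pos_iff, ← List.count_pos_iff, hcnt c]
    · intro c hcmem
      rw [beq_iff_eq, hgd1, hgd2, hcnt c]

-- the whole equivalence
theorem pvMain (my_word other_word : String) :
    match_with_gaps my_word other_word = match_with_gaps_alt my_word other_word := by
  unfold match_with_gaps match_with_gaps_alt
  have e1 : my_word.toList.foldl (fun acc c => if c ≠ ' ' then acc ++ [c] else acc) [] =
      my_word.toList.filter (fun c => decide (c ≠ ' ')) := by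
    simpa using PySem.List.foldl_append_ite_eq_filter (fun c => c ≠ ' ') my_word.toList []
  rw [e1]
  set w : List Char := my_word.toList.filter (fun c => decide (c ≠ ' ')) with hw
  set o : List Char := other_word.toList with ho
  by_cases hlen : w.length = o.length
  · have hne : ¬ (w.length ≠ o.length) := by omega
    simp only [if_neg hne]
    set z : List (Char × Char) := w.zip o with hz
    have hwz : z.map Prod.fst = w := List.map_fst_zip (by omega)
    have hoz : z.map Prod.snd = o := List.map_snd_zip (by omega)
    have hbridge := pvPosBridge w o hlen
    by_cases hbadB : z.any (fun p => decide (p.1 ≠ '_' ∧ p.1 ≠ p.2)) = true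
    · -- positional mismatch: A returns False from its first loop, B's pass hits the same pair
      have hA2 : (PySem.List.pyRange 0 (w.length : Int) 1).any
          (fun i => decide (PySem.List.pyGetD w i ' ' ≠ '_' ∧
                            PySem.List.pyGetD w i ' ' ≠ PySem.List.pyGetD o i ' ')) = true := by
        rw [hbridge]; exact hbadB
      simp only [if_pos hA2]
      obtain ⟨p, hp, hcond⟩ := List.any_eq_true.mp hbadB
      simp only [decide_eq_true_eq] at hcond
      obtain ⟨h1, h2⟩ := hcond
      symm
      rw [Bool.eq_false_iff]
      intro hall
      have hthis := List.all_eq_true.mp hall p hp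
      simp only [if_neg h1] at hthis
      rw [beq_iff_eq] at hthis
      exact h2 hthis
    · -- positional check passes on both sides
      have hA2 : ¬ ((PySem.List.pyRange 0 (w.length : Int) 1).any
          (fun i => decide (PySem.List.pyGetD w i ' ' ≠ '_' ∧
                            PySem.List.pyGetD w i ' ' ≠ PySem.List.pyGetD o i ' ')) = true) := by
        rw [hbridge]; exact hbadB
      simp only [if_neg hA2]
      have hpos : ∀ p ∈ z, p.1 = '_' ∨ p.1 = p.2 := by
        intro p hp
        by_cases h1 : p.1 = '_'
        · exact Or.inl h1
        · right
          by_contra h2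
          exact hbadB (List.any_eq_true.mpr ⟨p, hp, by simp [h1, h2]⟩)
      -- the two appending loops are filters
      have e2 : w.foldl (fun acc c => if c ≠ '_' then acc ++ [c] else acc) [] =
          w.filter (fun c => decide (c ≠ '_')) := by
        simpa using PySem.List.foldl_append_ite_eq_filter (fun c => c ≠ '_') w []
      rw [e2]
      have hiff := pvCountsIffHidden z hpos
      rw [hwz, hoz] at hiff
      set L : List Char := w.filter (fun c => decide (c ≠ '_')) with hLdef
      have e3 : o.foldl (fun acc c => if c ∈ L then acc ++ [c] else acc) [] =
          o.filter (fun c => decide (c ∈ L)) := by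
        simpa using PySem.List.foldl_append_ite_eq_filter (fun c => c ∈ L) o []
      rw [e3]
      have hdict := pvDictEqIffCounts L (o.filter (fun c => decide (c ∈ L)))
      by_cases hd : pvDictEq (pvCountLoop L)
          (pvCountLoop (o.filter (fun c => decide (c ∈ L)))) = true
      · simp only [if_neg (not_not_intro hd)]
        have hhid := hiff.mp (hdict.mp hd)
        symm
        rw [List.all_eq_true]
        intro p hp
        by_cases h1 : p.1 = '_'
        · simp only [if_pos h1]
          have hnotmem : p.2 ∉ L := hhid p hp h1
          have h5 : PySem.Set.contains (PySem.Set.ofList L) p.2 = false := by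
            cases hcon : PySem.Set.contains (PySem.Set.ofList L) p.2
            · rfl
            · exact absurd ((PySem.Set.mem_ofList L p.2).mp
                ((PySem.Set.contains_iff _ _).mp hcon)) hnotmem
          show (! PySem.Set.contains (PySem.Set.ofList L) p.2) = true
          rw [h5]
          rfl
        · rcases hpos p hp with h | h
          · exact absurd h h1
          · simp only [if_neg h1]
            simp [h]
      · simp only [if_pos hd]
        have hnot : ¬ (∀ p ∈ z, p.1 = '_' → p.2 ∉ L) := fun h => hd (hdict.mpr (hiff.mpr h))
        push Not at hnot
        obtain ⟨p, hp, h1, hmem⟩ := hnot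
        symm
        rw [Bool.eq_false_iff]
        intro hall
        have hthis := List.all_eq_true.mp hall p hp
        simp only [if_pos h1] at hthis
        have h5 : (! PySem.Set.contains (PySem.Set.ofList L) p.2) = true := hthis
        rw [Bool.not_eq_true'] at h5
        have hcon : PySem.Set.contains (PySem.Set.ofList L) p.2 = true :=
          (PySem.Set.contains_iff _ _).mpr ((PySem.Set.mem_ofList L p.2).mpr hmem)
        rw [hcon] at h5
        simp at h5
  · have hyes : w.length ≠ o.length := hlen
    simp only [if_pos hyes]

-- ===== VERDICT (by name: the statement is the Claim_ definition above) =====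
theorem match_with_gaps_spec : Claim_equal_match_with_gaps := by
  intro my_word other_word _
  unfold Spec_match_with_gaps
  exact pvMain my_word other_word
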